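-- pv_equiv track=rewrite | github.com/tsirleo/SoftwareTesting_examUtils | FSM_stats_and_W_Wp_tests.py | remove_prefixes
-- ===== SOURCE A (Python) =====
-- def preprocess(s):
--     if s.startswith("R.") and len(s) > 2:
--         return "R" + s[2:]
--     return s
--
-- def is_prefix(small, large):
--     return large.startswith(small)
--
-- def remove_prefixes(strings):
--     processed_strings = [preprocess(s) for s in strings]
--
--     result = []
--     for i, s in enumerate(processed_strings):
--         if not any(
--                 is_prefix(s, other) for j, other in enumerate(processed_strings) if i != j
--         ):
--             result.append(strings[i])
--
--     return result
-- ===== SOURCE B (Python) =====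
-- def preprocess(s):
--     if s.startswith("R.") and len(s) > 2:
--         return "R" + s[2:]
--     return s
--
-- def remove_prefixes(strings):
--     processed = [preprocess(s) for s in strings]
--     srt = sorted(processed)
--     dominated = {srt[k] for k in range(len(srt) - 1) if srt[k + 1].startswith(srt[k])}
--     return [s for s, p in zip(strings, processed) if p not in dominated]
-- ===== Notes on version B (the rewrite author's own statement) =====
-- stated objective: faster
-- what changed: Replaces the quadratic all-pairs prefix scan by sorting the processed strings once and marking a string dominated iff its sorted successor starts with it (duplicates become adjacent), then filtering in original order.
import Mathlib
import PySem

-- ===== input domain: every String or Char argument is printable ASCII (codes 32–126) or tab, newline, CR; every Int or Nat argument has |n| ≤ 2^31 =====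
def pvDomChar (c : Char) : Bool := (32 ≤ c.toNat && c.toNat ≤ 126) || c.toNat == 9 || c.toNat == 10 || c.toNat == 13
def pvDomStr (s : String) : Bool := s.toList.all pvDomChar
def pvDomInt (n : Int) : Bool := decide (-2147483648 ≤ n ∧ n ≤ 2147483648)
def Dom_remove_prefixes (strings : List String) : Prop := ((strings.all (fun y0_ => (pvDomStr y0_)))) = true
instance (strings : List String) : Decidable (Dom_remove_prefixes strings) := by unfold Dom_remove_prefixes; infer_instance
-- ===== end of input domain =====

-- B replaces A's quadratic all-pairs prefix scan by one sort of the processed strings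
-- (a processed string is a prefix of another element iff it is a prefix of its sorted
-- successor); same return value on every input.

-- shared helper: Python 'preprocess' (identical in Source A and Source B);
-- "R" + s[2:] is built as String.ofList of the code points, exact for every string
def preprocess (s : String) : String :=
  if PySem.Str.startswith s "R." && decide (2 < PySem.Str.len s) then
    String.ofList ('R' :: (PySem.Str.slice s (some 2) none).toList)
  else s

-- ===== PORT A =====
-- is_prefix(small, large) = large.startswith(small), inlined at its single call site
def remove_prefixes (strings : List String) : List String :=
  let processed := strings.map preprocess
  (PySem.List.enumerate processed).foldl
    (fun result is =>
      if !((PySem.List.enumerate processed).any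
            (fun jo => (is.1 != jo.1) && PySem.Str.startswith jo.2 is.2)) then
        result ++ [PySem.List.pyGetD strings is.1 ""]
      else result)
    []

-- ===== PORT B =====
def remove_prefixes_alt (strings : List String) : List String :=
  let processed := strings.map preprocess
  let srt := PySem.List.sorted processed (fun x => x) false
  let dominated : PySem.Set String := PySem.Set.ofList
    (((PySem.List.pyRange 0 ((srt.length : Int) - 1)).filter
        (fun k => PySem.Str.startswith (PySem.List.pyGetD srt (k + 1) "")
                    (PySem.List.pyGetD srt k ""))).map
      (fun k => PySem.List.pyGetD srt k ""))
  ((strings.zip processed).filter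
      (fun sp => !(PySem.Set.contains dominated sp.2))).map (fun sp => sp.1)

-- ===== PRECONDITION & SPEC =====
def Spec_remove_prefixes (strings : List String) (out : List String) : Prop := out = remove_prefixes_alt strings
instance (strings : List String) (out : List String) : Decidable (Spec_remove_prefixes strings out) := by unfold Spec_remove_prefixes; infer_instance

-- ===== CLAIM (what is proved, stated in full; the proofs are below) =====
def Claim_equal_remove_prefixes : Prop := ∀ (strings : List String), Dom_remove_prefixes strings → Spec_remove_prefixes strings (remove_prefixes strings)

-- ===== LEMMAS AND PROOFS =====

theorem pv_cons_le_cons_iff (a b : Char) (l m : List Char) :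
    a :: l ≤ b :: m ↔ a < b ∨ (a = b ∧ l ≤ m) := by
  rw [← Std.not_lt, List.cons_lt_cons_iff]
  constructor
  · intro h
    rcases lt_trichotomy a b with hc | hc | hc
    · exact Or.inl hc
    · exact Or.inr ⟨hc, Std.not_lt.1 (fun hlt => h (Or.inr ⟨hc.symm, hlt⟩))⟩
    · exact absurd (Or.inl hc) h
  · rintro (h | ⟨rfl, h⟩) hcon
    · rcases hcon with hc | ⟨hc, _⟩
      · exact absurd h (asymm hc)
      · exact absurd hc.symm h.ne
    · rcases hcon with hc | ⟨_, hc⟩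
      · exact absurd hc (lt_irrefl a)
      · exact absurd hc (Std.not_lt.2 h)

theorem pv_prefix_le (l : List Char) : ∀ (m : List Char), l <+: m → l ≤ m := by
  induction l with
  | nil =>
    intro m _
    rcases m with _ | ⟨a, t⟩
    · exact le_refl _
    · exact le_of_lt (List.nil_lt_cons a t)
  | cons c l' ih =>
    intro m h
    obtain ⟨t, rfl⟩ := h
    exact (pv_cons_le_cons_iff c c l' (l' ++ t)).2 (Or.inr ⟨rfl, ih _ ⟨t, rfl⟩⟩)

theorem pv_between_strict (v : List Char) : ∀ (u w : List Char),
    v < u → u < w → v <+: w → v <+: u := by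
  induction v with
  | nil => intro u w _ _ _; exact List.nil_prefix
  | cons c v' ih =>
    intro u w h1 h2 h3
    match u with
    | [] => exact absurd h1 (List.not_lt_nil _)
    | d :: u' =>
      obtain ⟨t, rfl⟩ := h3
      rcases (List.cons_lt_cons_iff).1 h1 with hcd | ⟨rfl, hvu⟩
      · rcases (List.cons_lt_cons_iff).1 h2 with hdc | ⟨rfl, _⟩
        · exact absurd hcd (asymm hdc)
        · exact absurd hcd (lt_irrefl _)
      · rcases (List.cons_lt_cons_iff).1 h2 with hdc | ⟨_, huw⟩
        · exact absurd hdc (lt_irrefl _)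
        · exact (List.cons_prefix_cons).2 ⟨rfl, ih u' (v' ++ t) hvu huw ⟨t, rfl⟩⟩

theorem pv_between (v u w : String) (h1 : v ≤ u) (h2 : u ≤ w)
    (h3 : v.toList <+: w.toList) : v.toList <+: u.toList := by
  rcases eq_or_lt_of_le h1 with rfl | h1'
  · exact List.prefix_refl _
  rcases eq_or_lt_of_le h2 with rfl | h2'
  · exact h3
  exact pv_between_strict v.toList u.toList w.toList
    (String.lt_iff_toList_lt.1 h1') (String.lt_iff_toList_lt.1 h2') h3

theorem pv_sorted_adj (S : List String) (s : String)
    (hsort : S.Pairwise (· ≤ ·)) (hmem : s ∈ S)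
    (h : (∃ w ∈ S, w ≠ s ∧ s.toList <+: w.toList) ∨ 2 ≤ S.count s) :
    ∃ m : Nat, m + 1 < S.length ∧ S[m]? = some s ∧
      ∃ u, S[m + 1]? = some u ∧ s.toList <+: u.toList := by
  induction S with
  | nil => cases hmem
  | cons a T ih =>
    have hle : ∀ b ∈ T, a ≤ b := (List.pairwise_cons.1 hsort).1
    have hT : T.Pairwise (· ≤ ·) := (List.pairwise_cons.1 hsort).2
    rcases h with ⟨w, hwmem, hwne, hwpre⟩ | hcnt
    · by_cases has : a = s
      · subst has
        have hwT : w ∈ T := by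
          rcases List.mem_cons.1 hwmem with h | h
          · exact absurd h hwne
          · exact h
        match T, hwT with
        | b :: T', hwT =>
          have hbw : b ≤ w := by
            rcases List.mem_cons.1 hwT with h | h
            · exact le_of_eq h.symm
            · exact (List.pairwise_cons.1 hT).1 w h
          refine ⟨0, by simp, by simp, b, by simp, ?_⟩
          exact pv_between a b w (hle b (by simp)) hbw hwpre
      · have hsT : s ∈ T := by
          rcases List.mem_cons.1 hmem with h | h
          · exact absurd h.symm has
          · exact h
        have hwT : w ∈ T := by
          rcases List.mem_cons.1 hwmem with rfl | h
          · exfalso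
            have h1 : s ≤ w := String.le_iff_toList_le.2 (pv_prefix_le _ _ hwpre)
            have h2 : w ≤ s := hle s hsT
            exact hwne (le_antisymm h2 h1)
          · exact h
        obtain ⟨m, hm, hget, u, hgetu, hpre⟩ := ih hT hsT (Or.inl ⟨w, hwT, hwne, hwpre⟩)
        exact ⟨m + 1, by simpa using Nat.succ_lt_succ hm, by simpa using hget, u,
          by simpa using hgetu, hpre⟩
    · by_cases has : a = s
      · subst has
        have h1 : 1 ≤ T.count a := by
          have := hcnt; rw [List.count_cons_self] at this; omega
        have haT : a ∈ T := List.one_le_count_iff.1 h1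
        match T, haT with
        | b :: T', haT =>
          have hba : b ≤ a := by
            rcases List.mem_cons.1 haT with h | h
            · exact le_of_eq h.symm
            · exact (List.pairwise_cons.1 hT).1 a h
          have hab : a ≤ b := hle b (by simp)
          have hba' : b = a := le_antisymm hba hab
          subst hba'
          exact ⟨0, by simp, by simp, b, by simp, List.prefix_refl _⟩
      · have hcntT : 2 ≤ T.count s := by
          have := hcnt
          rw [List.count_cons_of_ne (a := s) (b := a) (fun h => has h)] at this
          omega
        have hsT : s ∈ T := List.one_le_count_iff.1 (by omega)
        obtain ⟨m, hm, hget, u, hgetu, hpre⟩ := ih hT hsT (Or.inr hcntT)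
        exact ⟨m + 1, by simpa using Nat.succ_lt_succ hm, by simpa using hget, u,
          by simpa using hgetu, hpre⟩

theorem pv_adj_back (S : List String) (s : String)
    (h : ∃ m : Nat, m + 1 < S.length ∧ S[m]? = some s ∧
      ∃ u, S[m + 1]? = some u ∧ s.toList <+: u.toList) :
    (∃ w ∈ S, w ≠ s ∧ s.toList <+: w.toList) ∨ 2 ≤ S.count s := by
  obtain ⟨m, hm, hget, u, hgetu, hpre⟩ := h
  have hmlt : m < S.length := by omega
  have hgets : S[m] = s := by simpa [List.getElem?_eq_getElem hmlt] using hget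
  have hgetsu : S[m + 1] = u := by simpa [List.getElem?_eq_getElem hm] using hgetu
  by_cases hus : u = s
  · subst hus
    right
    have hd : List.Duplicate u S := by
      rw [List.duplicate_iff_exists_distinct_get]
      exact ⟨⟨m, hmlt⟩, ⟨m + 1, hm⟩, Fin.mk_lt_mk.2 (Nat.lt_succ_self m),
        by simp [hgets], by simp [hgetsu]⟩
    exact List.duplicate_iff_two_le_count.1 hd
  · exact Or.inl ⟨u, hgetsu ▸ List.getElem_mem hm, hus, hpre⟩

theorem pv_idx_iff (proc : List String) (k : Nat) (hk : k < proc.length) :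
    (∃ j, ∃ hj : j < proc.length, j ≠ k ∧ proc[k].toList <+: proc[j].toList) ↔
    ((∃ w ∈ proc, w ≠ proc[k] ∧ proc[k].toList <+: w.toList) ∨ 2 ≤ proc.count proc[k]) := by
  constructor
  · rintro ⟨j, hj, hjk, hpre⟩
    by_cases he : proc[j] = proc[k]
    · right
      have hd : List.Duplicate proc[k] proc := by
        rw [List.duplicate_iff_exists_distinct_get]
        rcases Nat.lt_or_ge j k with h | h
        · exact ⟨⟨j, hj⟩, ⟨k, hk⟩, Fin.mk_lt_mk.2 h, by simp [he], by simp⟩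
        · exact ⟨⟨k, hk⟩, ⟨j, hj⟩, Fin.mk_lt_mk.2 (by omega), by simp, by simp [he]⟩
      exact List.duplicate_iff_two_le_count.1 hd
    · exact Or.inl ⟨proc[j], List.getElem_mem hj, he, hpre⟩
  · rintro (⟨w, hwmem, hwne, hwpre⟩ | hcnt)
    · obtain ⟨j, hj, hje⟩ := List.mem_iff_getElem.1 hwmem
      refine ⟨j, hj, fun h => hwne ?_, hje ▸ hwpre⟩
      subst h; rw [hje]
    · obtain ⟨⟨i, hi⟩, ⟨j, hj⟩, hij, h1, h2⟩ :=
        List.duplicate_iff_exists_distinct_get.1 (List.duplicate_iff_two_le_count.2 hcnt)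
      have hij' : i < j := Fin.mk_lt_mk.1 hij
      simp only [List.get_eq_getElem] at h1 h2
      by_cases hik : i = k
      · exact ⟨j, hj, by omega, by rw [← h2]⟩
      · exact ⟨i, hi, hik, by rw [← h1]⟩

theorem pv_any_iff (proc : List String) (k : Nat) (hk : k < proc.length) :
    ((PySem.List.enumerate proc).any
        (fun jo => (((0 : Int) + (k : Nat)) != jo.1) && PySem.Str.startswith jo.2 proc[k])) = true ↔
    (∃ j, ∃ hj : j < proc.length, j ≠ k ∧ proc[k].toList <+: proc[j].toList) := by
  rw [List.any_eq_true]
  constructor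
  · rintro ⟨jo, hjo, hcond⟩
    obtain ⟨j, hj, rfl⟩ := (PySem.List.mem_enumerate_iff proc 0 jo).1 hjo
    rw [Bool.and_eq_true, bne_iff_ne] at hcond
    refine ⟨j, hj, ?_, ?_⟩
    · intro h; subst h; exact hcond.1 rfl
    · exact (PySem.Chars.startswith_iff _ _).1
        (by simpa [PySem.Str.startswith_eq] using hcond.2)
  · rintro ⟨j, hj, hjk, hpre⟩
    refine ⟨((0 : Int) + (j : Nat), proc[j]), (PySem.List.mem_enumerate_iff proc 0 _).2 ⟨j, hj, rfl⟩, ?_⟩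
    rw [Bool.and_eq_true, bne_iff_ne]
    constructor
    · intro h
      have : (k : Int) = (j : Int) := by omega
      exact hjk (by exact_mod_cast this.symm)
    · simp [PySem.Str.startswith_eq]
      exact (PySem.Chars.startswith_iff _ _).2 hpre

-- membership in B's dominated list ↔ adjacent-pair form

theorem pv_dom_iff (srt : List String) (s : String) :
    (s ∈ PySem.Set.ofList
      (((PySem.List.pyRange 0 ((srt.length : Int) - 1)).filter
          (fun k' => PySem.Str.startswith (PySem.List.pyGetD srt (k' + 1) "")
            (PySem.List.pyGetD srt k' ""))).map
        (fun k' => PySem.List.pyGetD srt k' ""))) ↔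
    (∃ m : Nat, m + 1 < srt.length ∧ srt[m]? = some s ∧
      ∃ u, srt[m + 1]? = some u ∧ s.toList <+: u.toList) := by
  rw [PySem.Set.mem_ofList, List.mem_map]
  constructor
  · rintro ⟨k', hk', rfl⟩
    rw [List.mem_filter] at hk'
    obtain ⟨hmem, hcond⟩ := hk'
    rw [PySem.List.mem_pyRange_one] at hmem
    obtain ⟨h0, hlt⟩ := hmem
    have hm : k'.toNat + 1 < srt.length := by omega
    have hmlt : k'.toNat < srt.length := by omega
    have e1 : PySem.List.pyGetD srt k' "" = srt[k'.toNat] := by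
      rw [PySem.List.pyGetD_of_nonneg srt "" h0, List.getD_eq_getElem srt "" hmlt]
    have e2 : PySem.List.pyGetD srt (k' + 1) "" = srt[k'.toNat + 1] := by
      rw [PySem.List.pyGetD_of_nonneg srt "" (by omega)]
      have : (k' + 1).toNat = k'.toNat + 1 := by omega
      rw [this, List.getD_eq_getElem srt "" hm]
    rw [e1, e2] at hcond
    rw [e1]
    exact ⟨k'.toNat, hm, by simp [List.getElem?_eq_getElem hmlt], srt[k'.toNat + 1],
      by simp [List.getElem?_eq_getElem hm],
      (PySem.Chars.startswith_iff _ _).1 (by simpa [PySem.Str.startswith_eq] using hcond)⟩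
  · rintro ⟨m, hm, hget, u, hgetu, hpre⟩
    have hmlt : m < srt.length := by omega
    have hgets : srt[m] = s := by simpa [List.getElem?_eq_getElem hmlt] using hget
    have hgetsu : srt[m + 1] = u := by simpa [List.getElem?_eq_getElem hm] using hgetu
    refine ⟨(m : Int), ?_, ?_⟩
    · rw [List.mem_filter, PySem.List.mem_pyRange_one]
      refine ⟨⟨by omega, by omega⟩, ?_⟩
      have e1 : PySem.List.pyGetD srt (m : Int) "" = srt[m] := by
        rw [PySem.List.pyGetD_natCast, List.getD_eq_getElem srt "" hmlt]
      have e2 : PySem.List.pyGetD srt ((m : Int) + 1) "" = srt[m + 1] := by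
        have : ((m : Int) + 1) = ((m + 1 : Nat) : Int) := by omega
        rw [this, PySem.List.pyGetD_natCast, List.getD_eq_getElem srt "" hm]
      rw [e1, e2, hgets, hgetsu, PySem.Str.startswith_eq]
      exact (PySem.Chars.startswith_iff _ _).2 hpre
    · rw [PySem.List.pyGetD_natCast, List.getD_eq_getElem srt "" hmlt, hgets]

theorem pv_cond_eq (proc : List String) (k : Nat) (hk : k < proc.length) :
    ((PySem.List.enumerate proc).any
        (fun jo => (((0 : Int) + (k : Nat)) != jo.1) && PySem.Str.startswith jo.2 proc[k])) =
    (PySem.Set.contains (PySem.Set.ofList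
      (((PySem.List.pyRange 0 (((PySem.List.sorted proc (fun x => x) false).length : Int) - 1)).filter
          (fun k' => PySem.Str.startswith
            (PySem.List.pyGetD (PySem.List.sorted proc (fun x => x) false) (k' + 1) "")
            (PySem.List.pyGetD (PySem.List.sorted proc (fun x => x) false) k' ""))).map
        (fun k' => PySem.List.pyGetD (PySem.List.sorted proc (fun x => x) false) k' "")))
      proc[k]) := by
  rw [Bool.eq_iff_iff, pv_any_iff proc k hk, PySem.Set.contains_iff, pv_dom_iff]
  have hperm : (PySem.List.sorted proc (fun x => x) false).Perm proc :=
    PySem.List.sorted_perm proc (fun x => x) false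
  have hsort : (PySem.List.sorted proc (fun x => x) false).Pairwise (· ≤ ·) := by
    have := PySem.List.sorted_pairwise proc (fun x => x)
    simpa using this
  have hmem : proc[k] ∈ PySem.List.sorted proc (fun x => x) false :=
    hperm.mem_iff.2 (List.getElem_mem hk)
  rw [pv_idx_iff proc k hk]
  constructor
  · intro h
    apply pv_sorted_adj _ _ hsort hmem
    rcases h with ⟨w, hw, hne, hpre⟩ | hcnt
    · exact Or.inl ⟨w, hperm.mem_iff.2 hw, hne, hpre⟩
    · exact Or.inr (by rw [hperm.count_eq]; exact hcnt)
  · intro h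
    rcases pv_adj_back _ _ h with ⟨w, hw, hne, hpre⟩ | hcnt
    · exact Or.inl ⟨w, hperm.mem_iff.1 hw, hne, hpre⟩
    · exact Or.inr (by rw [← hperm.count_eq]; exact hcnt)

theorem pv_enumerate_map (f : String → String) (l : List String) : ∀ (s : Int),
    PySem.List.enumerate (l.map f) s = (PySem.List.enumerate l s).map (fun ia => (ia.1, f ia.2)) := by
  induction l with
  | nil => intro s; simp [PySem.List.enumerate_nil]
  | cons a t ih => intro s; simp [PySem.List.enumerate_cons, ih]

theorem pv_map_snd_filter_enumerate (r : String → Bool) (l : List String) : ∀ (s : Int),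
    (((PySem.List.enumerate l s).filter (fun ia => r ia.2)).map (fun ia => ia.2)) = l.filter r := by
  induction l with
  | nil => intro s; simp [PySem.List.enumerate_nil]
  | cons a t ih =>
    intro s
    rw [PySem.List.enumerate_cons]
    by_cases h : r a
    · simp [h, ih]
    · simp [h, ih]

theorem pv_main_eq (strings : List String) : remove_prefixes strings = remove_prefixes_alt strings := by
  unfold remove_prefixes remove_prefixes_alt
  dsimp only
  rw [PySem.List.foldl_append_if
    (fun is => !((PySem.List.enumerate (strings.map preprocess)).any
          (fun jo => (is.1 != jo.1) && PySem.Str.startswith jo.2 is.2)))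
    (fun is => PySem.List.pyGetD strings is.1 "") (PySem.List.enumerate (strings.map preprocess)) []]
  rw [List.nil_append]
  rw [List.filter_congr (q := fun is : Int × String =>
    !(PySem.Set.contains (PySem.Set.ofList
      (((PySem.List.pyRange 0 (((PySem.List.sorted (strings.map preprocess) (fun x => x) false).length : Int) - 1)).filter
          (fun k' => PySem.Str.startswith
            (PySem.List.pyGetD (PySem.List.sorted (strings.map preprocess) (fun x => x) false) (k' + 1) "")
            (PySem.List.pyGetD (PySem.List.sorted (strings.map preprocess) (fun x => x) false) k' ""))).map
        (fun k' => PySem.List.pyGetD (PySem.List.sorted (strings.map preprocess) (fun x => x) false) k' "")))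
      is.2))
    (by
      intro is hmem
      obtain ⟨k, hk, rfl⟩ := (PySem.List.mem_enumerate_iff _ 0 is).1 hmem
      rw [pv_cond_eq (strings.map preprocess) k hk])]
  rw [pv_enumerate_map preprocess strings 0, List.filter_map, List.map_map]
  rw [List.map_congr_left (g := fun ia : Int × String => ia.2) (fun ia hia => by
    obtain ⟨k, hk, rfl⟩ := (PySem.List.mem_enumerate_iff _ 0 ia).1 (List.mem_of_mem_filter hia)
    simp only [Function.comp_def]
    rw [zero_add, PySem.List.pyGetD_natCast, List.getD_eq_getElem strings "" hk])]
  rw [← List.map_prod_left_eq_zip, List.filter_map, List.map_map]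
  simp only [Function.comp_def]
  rw [pv_map_snd_filter_enumerate (fun v => !(PySem.Set.ofList
      (((PySem.List.pyRange 0 (((PySem.List.sorted (strings.map preprocess) (fun x => x) false).length : Int) - 1)).filter
          (fun k' => PySem.Str.startswith
            (PySem.List.pyGetD (PySem.List.sorted (strings.map preprocess) (fun x => x) false) (k' + 1) "")
            (PySem.List.pyGetD (PySem.List.sorted (strings.map preprocess) (fun x => x) false) k' ""))).map
        (fun k' => PySem.List.pyGetD (PySem.List.sorted (strings.map preprocess) (fun x => x) false) k' ""))).contains
      (preprocess v)) strings 0]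
  simp

-- ===== VERDICT (by name: the statement is the Claim_ definition above) =====
theorem remove_prefixes_spec : Claim_equal_remove_prefixes := by
  intro strings _
  unfold Spec_remove_prefixes
  exact pv_main_eq strings
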